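-- pv_equiv track=rewrite | github.com/mohdaman892/Leetcode-Solutions | 2626-count-the-number-of-good-subarrays/count-the-number-of-good-subarrays.py | countGood
-- ===== SOURCE A (Python) =====
-- from typing import List
--
-- def countGood(nums: List[int], k: int) -> int:
--     i = 0
--     n = len(nums)
--     hm = {}
--     c = 0
--     ans = 0
--     for j in range(n):
--         if nums[j] not in hm:
--             hm[nums[j]] = 0
--         c += hm[nums[j]]
--         hm[nums[j]] += 1
--         while i<j and c>=k:
--             ans += n-j
--             hm[nums[i]]-=1
--             c -= hm[nums[i]]
--             i += 1
--
--     return ans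
-- ===== SOURCE B (Python) =====
-- def countGood(nums, k):
--     # Brute force: for each start i, scan right counting equal pairs with a counter;
--     # count windows of length >= 2 whose pair count reaches k.
--     n = len(nums)
--     ans = 0
--     for i in range(n):
--         cnt = {}
--         pairs = 0
--         for e in range(i, n):
--             pairs += cnt.get(nums[e], 0)
--             cnt[nums[e]] = cnt.get(nums[e], 0) + 1
--             if e > i and pairs >= k:
--                 ans += 1
--     return ans
-- ===== Notes on version B (the rewrite author's own statement) =====
-- stated objective: simpler
-- what changed: A's amortized-linear two-pointer sliding window (one hash map maintained while the left end chases the right end) is replaced by a plain brute-force enumeration: for each start index a fresh counter scans rightward, counting every window of length >= 2 whose number of equal pairs reaches k.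
import Mathlib
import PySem

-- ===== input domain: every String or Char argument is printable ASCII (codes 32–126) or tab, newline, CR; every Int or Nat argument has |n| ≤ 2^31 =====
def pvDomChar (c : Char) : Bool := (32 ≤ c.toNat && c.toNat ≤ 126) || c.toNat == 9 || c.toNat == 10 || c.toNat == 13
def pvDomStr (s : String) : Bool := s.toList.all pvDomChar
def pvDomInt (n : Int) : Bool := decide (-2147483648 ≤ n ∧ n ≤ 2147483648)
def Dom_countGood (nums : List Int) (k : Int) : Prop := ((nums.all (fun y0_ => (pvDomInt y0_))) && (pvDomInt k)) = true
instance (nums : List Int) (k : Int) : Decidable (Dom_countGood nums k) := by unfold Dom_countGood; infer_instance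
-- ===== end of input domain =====

-- B replaces A's linear two-pointer sliding window by a simpler brute-force per-start scan
-- (quadratic, no window shrinking); the theorems prove the return values equal on all inputs.

-- ===== PORT A =====
-- A's inner `while i<j and c>=k` loop; fuel = (j-i).toNat steps suffice since i increases
-- towards j and the guard requires i < j, so the fuel bound is never the reason it stops.
def countGoodShrink (nums : List Int) (k n j : Int) :
    Nat → Int × PySem.Dict Int Int × Int × Int → Int × PySem.Dict Int Int × Int × Int
  | 0, st => st
  | fuel + 1, (i, hm, c, ans) =>
    if i < j ∧ k ≤ c then
      let ans := ans + (n - j)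
      let x := PySem.List.pyGetD nums i 0      -- nums[i]; 0 ≤ i < j < n here, always in range
      let hm := hm.insert x (hm.getD x 0 - 1)  -- hm[nums[i]] -= 1 (key always present here)
      let c := c - hm.getD x 0
      countGoodShrink nums k n j fuel (i + 1, hm, c, ans)
    else (i, hm, c, ans)

def countGood (nums : List Int) (k : Int) : Int :=
  let n : Int := (nums.length : Int)
  let st :=
    (PySem.List.pyRange 0 n 1).foldl
      (fun (st : Int × PySem.Dict Int Int × Int × Int) j =>
        let (i, hm, c, ans) := st
        let x := PySem.List.pyGetD nums j 0     -- nums[j]; 0 ≤ j < n, always in range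
        let hm := if hm.contains x then hm else hm.insert x 0
        let c := c + hm.getD x 0
        let hm := hm.insert x (hm.getD x 0 + 1)
        countGoodShrink nums k n j ((j - i).toNat) (i, hm, c, ans))
      (0, PySem.Dict.empty, 0, 0)
  st.2.2.2

-- ===== PORT B =====
def countGood_alt (nums : List Int) (k : Int) : Int :=
  let n : Int := (nums.length : Int)
  (PySem.List.pyRange 0 n 1).foldl
    (fun ans i =>
      let inner :=
        (PySem.List.pyRange i n 1).foldl
          (fun (st : PySem.Dict Int Int × Int × Int) e =>
            let (cnt, pairs, ans) := st
            let x := PySem.List.pyGetD nums e 0  -- nums[e]; 0 ≤ e < n, always in range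
            let pairs := pairs + cnt.getD x 0
            let cnt := cnt.insert x (cnt.getD x 0 + 1)
            let ans := if i < e ∧ k ≤ pairs then ans + 1 else ans
            (cnt, pairs, ans))
          (PySem.Dict.empty, 0, ans)
      inner.2.2)
    0

-- ===== PRECONDITION & SPEC =====
def Spec_countGood (nums : List Int) (k : Int) (out : Int) : Prop := out = countGood_alt nums k
instance (nums : List Int) (k : Int) (out : Int) : Decidable (Spec_countGood nums k out) := by unfold Spec_countGood; infer_instance

-- ===== CLAIM (what is proved, stated in full; the proofs are below) =====
def Claim_equal_countGood : Prop := ∀ (nums : List Int) (k : Int), Dom_countGood nums k → Spec_countGood nums k (countGood nums k)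

-- ===== LEMMAS AND PROOFS =====

-- number of equal-valued index pairs in a list
def pairsOf : List Int → Int
  | [] => 0
  | x :: t => (t.count x : Int) + pairsOf t

-- the window nums[i:j] (half-open)
def win (nums : List Int) (i j : Nat) : List Int := (nums.take j).drop i

-- "the subarray nums[i..e] is good": length ≥ 2 and at least k equal pairs
def goodB (nums : List Int) (k : Int) (i e : Nat) : Bool :=
  decide (i < e) && decide (k ≤ pairsOf (win nums i (e + 1)))

-- number of good subarrays starting at i
def contrib (nums : List Int) (k : Int) (i : Nat) : Nat :=
  (List.range nums.length).countP (goodB nums k i)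

-- sum of contributions of the starts below m
def S (nums : List Int) (k : Int) (m : Nat) : Int :=
  ((List.range m).map (fun i => (contrib nums k i : Int))).sum

theorem pairsOf_append_singleton (l : List Int) (x : Int) :
    pairsOf (l ++ [x]) = pairsOf l + (l.count x : Int) := by
  induction l with
  | nil => simp [pairsOf]
  | cons y t ih =>
    simp [pairsOf, ih, List.count_append, List.count_cons]
    by_cases h : x = y
    · subst h; simp; ring
    · simp [h, Ne.symm h]; ring

theorem win_succ_right (nums : List Int) (i j : Nat) (hij : i ≤ j) (hj : j < nums.length) :
    win nums i (j + 1) = win nums i j ++ [nums[j]] := by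
  unfold win
  rw [List.take_add_one, List.getElem?_eq_getElem hj]
  rw [List.drop_append_of_le_length (by simp; omega)]
  simp

theorem win_cons (nums : List Int) (i j : Nat) (hij : i < j) (hj : j ≤ nums.length) :
    win nums i j = nums[i]'(by omega) :: win nums (i + 1) j := by
  unfold win
  rw [List.drop_eq_getElem_cons (by simp; omega)]
  congr 1
  exact List.getElem_take

theorem pairsOf_win_mono_right (nums : List Int) (i j e : Nat)
    (hij : i ≤ j) (hje : j ≤ e) (he : e ≤ nums.length) :
    pairsOf (win nums i j) ≤ pairsOf (win nums i e) := by
  induction e, hje using Nat.le_induction with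
  | base => exact le_refl _
  | succ e he' ih =>
    have h1 : pairsOf (win nums i e) ≤ pairsOf (win nums i (e + 1)) := by
      rw [win_succ_right nums i e (by omega) (by omega)]
      rw [pairsOf_append_singleton]
      have : (0 : Int) ≤ ((win nums i e).count nums[e] : Int) := by positivity
      omega
    exact le_trans (ih (by omega)) h1

theorem goodB_anti_left (nums : List Int) (k : Int) (i i' e : Nat) (hii : i ≤ i')
    (he : e < nums.length) (h : goodB nums k i' e = true) : goodB nums k i e = true := by
  induction i', hii using Nat.le_induction with
  | base => exact h
  | succ i' hi' ih =>
    apply ih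
    simp only [goodB, Bool.and_eq_true, decide_eq_true_eq] at h ⊢
    obtain ⟨h1, h2⟩ := h
    refine ⟨by omega, le_trans h2 ?_⟩
    rw [win_cons nums i' (e + 1) (by omega) (by omega), pairsOf]
    have : (0 : Int) ≤ ((win nums (i' + 1) (e + 1)).count (nums[i']'(by omega)) : Int) := by positivity
    omega

theorem contrib_eq_of_first (nums : List Int) (k : Int) (i j : Nat) (hj : j < nums.length)
    (hgood : goodB nums k i j = true) (hnot : ∀ e, e < j → goodB nums k i e = false) :
    contrib nums k i = nums.length - j := by
  have hsplit : nums.length = j + (nums.length - j) := by omega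
  unfold contrib
  rw [hsplit, List.range_add, List.countP_append]
  have h1 : (List.range j).countP (goodB nums k i) = 0 := by
    rw [List.countP_eq_zero]
    intro e he
    simp only [List.mem_range] at he
    simp [hnot e he]
  have h2 : ((List.range (nums.length - j)).map (j + ·)).countP (goodB nums k i) =
      ((List.range (nums.length - j)).map (j + ·)).length := by
    rw [List.countP_eq_length]
    intro e he
    simp only [List.mem_map, List.mem_range] at he
    obtain ⟨d, hd, rfl⟩ := he
    simp only [goodB, Bool.and_eq_true, decide_eq_true_eq] at hgood ⊢
    obtain ⟨hg1, hg2⟩ := hgood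
    refine ⟨by omega, le_trans hg2 ?_⟩
    exact pairsOf_win_mono_right nums i (j + 1) (j + d + 1) (by omega) (by omega) (by omega)
  simp [h1, h2]

theorem contrib_eq_zero (nums : List Int) (k : Int) (i i' : Nat) (hii : i ≤ i')
    (hnot : ∀ e, e < nums.length → goodB nums k i e = false) :
    contrib nums k i' = 0 := by
  unfold contrib
  rw [List.countP_eq_zero]
  intro e he
  simp only [List.mem_range] at he
  by_contra hc
  have := goodB_anti_left nums k i i' e hii he (by simpa using hc)
  simp [hnot e he] at this

theorem S_succ (nums : List Int) (k : Int) (m : Nat) :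
    S nums k (m + 1) = S nums k m + (contrib nums k m : Int) := by
  simp [S, List.range_succ]

-- ======== A side ========

def hmOK (nums : List Int) (hm : PySem.Dict Int Int) (i j : Nat) : Prop :=
  ∀ v, hm.getD v 0 = ((win nums i j).count v : Int)

def notGoodYet (nums : List Int) (k : Int) (i j : Nat) : Prop :=
  ∀ e, e < j → goodB nums k i e = false

theorem shrink_spec (nums : List Int) (k : Int) (j : Nat) (hj : j < nums.length) :
    ∀ (fuel i : Nat) (hm : PySem.Dict Int Int),
      j - i ≤ fuel → i ≤ j →
      hmOK nums hm i (j + 1) → notGoodYet nums k i j →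
      ∃ (i₂ : Nat) (hm₂ : PySem.Dict Int Int),
        countGoodShrink nums k (nums.length : Int) (j : Int) fuel
            ((i : Int), hm, pairsOf (win nums i (j + 1)), S nums k i)
          = ((i₂ : Int), hm₂, pairsOf (win nums i₂ (j + 1)), S nums k i₂) ∧
        i₂ ≤ j ∧ hmOK nums hm₂ i₂ (j + 1) ∧ notGoodYet nums k i₂ (j + 1) := by
  intro fuel
  induction fuel with
  | zero =>
    intro i hm hfuel hij hhm hng
    refine ⟨i, hm, rfl, hij, hhm, ?_⟩
    intro e he
    rcases Nat.lt_or_ge e j with h | h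
    · exact hng e h
    · have hej : e = j := by omega
      have hijj : i = j := by omega
      subst hej; subst hijj
      simp [goodB]
  | succ fuel ih =>
    intro i hm hfuel hij hhm hng
    by_cases hg : ((i : Int) < (j : Int) ∧ k ≤ pairsOf (win nums i (j + 1)))
    · have hij' : i < j := by exact_mod_cast hg.1
      have hx : PySem.List.pyGetD nums (i : Int) 0 = nums[i]'(by omega) := by
        simp [PySem.List.pyGetD_natCast, List.getD_eq_getElem?_getD,
          List.getElem?_eq_getElem (show i < nums.length by omega)]
      have hwin : win nums i (j + 1) = nums[i]'(by omega) :: win nums (i + 1) (j + 1) :=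
        win_cons nums i (j + 1) (by omega) (by omega)
      have hcount : ((win nums i (j + 1)).count (nums[i]'(by omega)) : Int)
          = ((win nums (i + 1) (j + 1)).count (nums[i]'(by omega)) : Int) + 1 := by
        rw [hwin]; simp
      have hgood : goodB nums k i j = true := by
        simp only [goodB, Bool.and_eq_true, decide_eq_true_eq]
        exact ⟨hij', hg.2⟩
      have hcontrib : contrib nums k i = nums.length - j :=
        contrib_eq_of_first nums k i j hj hgood hng
      have hans : S nums k i + ((nums.length : Int) - (j : Int)) = S nums k (i + 1) := by
        rw [S_succ, hcontrib]
        push_cast [Nat.cast_sub (le_of_lt hj)]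
        ring
      simp only [countGoodShrink]
      rw [if_pos hg]
      have harg :
          ((i : Int) + 1,
            hm.insert (PySem.List.pyGetD nums (i : Int) 0)
              (hm.getD (PySem.List.pyGetD nums (i : Int) 0) 0 - 1),
            pairsOf (win nums i (j + 1)) -
              (hm.insert (PySem.List.pyGetD nums (i : Int) 0)
                (hm.getD (PySem.List.pyGetD nums (i : Int) 0) 0 - 1)).getD
                (PySem.List.pyGetD nums (i : Int) 0) 0,
            S nums k i + ((nums.length : Int) - (j : Int)))
          = (((i + 1 : Nat) : Int),
            hm.insert (nums[i]'(by omega)) (hm.getD (nums[i]'(by omega)) 0 - 1),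
            pairsOf (win nums (i + 1) (j + 1)), S nums k (i + 1)) := by
        rw [hx, hans]
        refine Prod.ext (by push_cast; ring) (Prod.ext rfl (Prod.ext ?_ rfl))
        rw [PySem.Dict.getD_insert_self, hhm (nums[i]'(by omega)), hwin]
        simp only [pairsOf, List.count_cons_self]
        push_cast
        ring
      rw [harg]
      apply ih (i + 1)
      · omega
      · omega
      · intro v
        rcases eq_or_ne v (nums[i]'(by omega)) with hv | hv
        · subst hv
          rw [PySem.Dict.getD_insert_self, hhm, hcount]; ring
        · rw [PySem.Dict.getD_insert]
          simp only [hv, if_false]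
          rw [hhm v, hwin]
          simp [Ne.symm hv]
      · intro e he
        by_contra hc
        have := goodB_anti_left nums k i (i + 1) e (by omega) (by omega) (by simpa using hc)
        simp [hng e he] at this
    · simp only [countGoodShrink]
      rw [if_neg hg]
      refine ⟨i, hm, rfl, hij, hhm, ?_⟩
      intro e he
      rcases Nat.lt_or_ge e j with h | h
      · exact hng e h
      · have hej : e = j := by omega
        subst hej
        rw [Bool.eq_false_iff]
        simp only [ne_eq, goodB, Bool.and_eq_true, decide_eq_true_eq, not_and]
        intro h1 h2
        exact hg ⟨by exact_mod_cast h1, h2⟩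

theorem outer_spec (nums : List Int) (k : Int) :
    ∀ (m : Nat), m ≤ nums.length →
      ∃ (i : Nat) (hm : PySem.Dict Int Int),
        (PySem.List.pyRange 0 (m : Int) 1).foldl
          (fun (st : Int × PySem.Dict Int Int × Int × Int) j =>
            let (i, hm, c, ans) := st
            let x := PySem.List.pyGetD nums j 0
            let hm := if hm.contains x then hm else hm.insert x 0
            let c := c + hm.getD x 0
            let hm := hm.insert x (hm.getD x 0 + 1)
            countGoodShrink nums k (nums.length : Int) j ((j - i).toNat) (i, hm, c, ans))
          (0, PySem.Dict.empty, 0, 0)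
          = ((i : Int), hm, pairsOf (win nums i m), S nums k i) ∧
        i ≤ m ∧ hmOK nums hm i m ∧ notGoodYet nums k i m := by
  intro m
  induction m with
  | zero =>
    intro _
    refine ⟨0, PySem.Dict.empty, ?_, le_refl 0, ?_, by intro e he; omega⟩
    · simp [PySem.List.pyRange_one_eq_nil, win, pairsOf, S]
    · intro v; simp [PySem.Dict.getD_empty, win]
  | succ m ihm =>
    intro hm1
    obtain ⟨i, hm, hst, hij, hhm, hng⟩ := ihm (by omega)
    have hmlt : m < nums.length := by omega
    have hrange : PySem.List.pyRange 0 ((m + 1 : Nat) : Int) 1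
        = PySem.List.pyRange 0 (m : Int) 1 ++ [(m : Int)] := by
      push_cast
      exact PySem.List.pyRange_one_succ_right (by positivity)
    rw [hrange, List.foldl_append, hst]
    simp only [List.foldl_cons, List.foldl_nil]
    have hx : PySem.List.pyGetD nums (m : Int) 0 = nums[m]'hmlt := by
      simp [PySem.List.pyGetD_natCast, List.getD_eq_getElem?_getD,
        List.getElem?_eq_getElem hmlt]
    have hwin : win nums i (m + 1) = win nums i m ++ [nums[m]'hmlt] :=
      win_succ_right nums i m hij hmlt
    set x : Int := nums[m]'hmlt with hxdef
    -- the `if x not in hm` step does not change any getD value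
    have hhm1 : hmOK nums (if hm.contains x then hm else hm.insert x 0) i m := by
      by_cases hc : hm.contains x
      · simpa [hc] using hhm
      · simp only [hc, Bool.false_eq_true, if_false]
        intro v
        rcases eq_or_ne v x with hv | hv
        · subst hv
          rw [PySem.Dict.getD_insert_self]
          rw [← hhm x, PySem.Dict.getD_of_not_contains hm 0 (by simpa using hc)]
        · rw [PySem.Dict.getD_insert]
          simp only [hv, if_false]
          exact hhm v
    set hm1d : PySem.Dict Int Int := if hm.contains x then hm else hm.insert x 0 with hm1def
    have hc1 : pairsOf (win nums i m) + hm1d.getD x 0 = pairsOf (win nums i (m + 1)) := by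
      rw [hhm1 x, hwin, pairsOf_append_singleton]
    have hhm2 : hmOK nums (hm1d.insert x (hm1d.getD x 0 + 1)) i (m + 1) := by
      intro v
      rcases eq_or_ne v x with hv | hv
      · subst hv
        rw [PySem.Dict.getD_insert_self, hhm1 x, hwin]
        simp [List.count_append]
      · rw [PySem.Dict.getD_insert]
        simp only [hv, if_false]
        rw [hhm1 v, hwin]
        simp [List.count_append, Ne.symm hv]
    obtain ⟨i₂, hm₂, heq, hij₂, hhm₂, hng₂⟩ :=
      shrink_spec nums k m hmlt (((m : Int) - (i : Int)).toNat) i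
        (hm1d.insert x (hm1d.getD x 0 + 1)) (by omega) hij hhm2 hng
    refine ⟨i₂, hm₂, ?_, by omega, hhm₂, hng₂⟩
    rw [hx, ← hm1def, hc1, ← heq]

theorem S_stable (nums : List Int) (k : Int) (i : Nat)
    (hnot : ∀ e, e < nums.length → goodB nums k i e = false) :
    ∀ m, i ≤ m → S nums k m = S nums k i := by
  intro m him
  induction m, him using Nat.le_induction with
  | base => rfl
  | succ m him ih =>
    rw [S_succ, ih, contrib_eq_zero nums k i m him hnot]
    simp

theorem countGood_eq_S (nums : List Int) (k : Int) :
    countGood nums k = S nums k nums.length := by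
  obtain ⟨i, hm, hst, hij, hhm, hng⟩ := outer_spec nums k nums.length (le_refl _)
  unfold countGood
  simp only
  rw [hst]
  exact (S_stable nums k i hng nums.length hij).symm

-- ======== B side ========

theorem inner_spec (nums : List Int) (k : Int) (i : Nat) (_hi : i < nums.length) :
    ∀ (e : Nat), i ≤ e → e ≤ nums.length →
    ∀ (cnt : PySem.Dict Int Int) (ans : Int),
      hmOK nums cnt i e →
      ((PySem.List.pyRange (e : Int) (nums.length : Int) 1).foldl
        (fun (st : PySem.Dict Int Int × Int × Int) e =>
          let (cnt, pairs, ans) := st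
          let x := PySem.List.pyGetD nums e 0
          let pairs := pairs + cnt.getD x 0
          let cnt := cnt.insert x (cnt.getD x 0 + 1)
          let ans := if (i : Int) < e ∧ k ≤ pairs then ans + 1 else ans
          (cnt, pairs, ans))
        (cnt, pairsOf (win nums i e), ans)).2.2
      = ans + (((List.range nums.length).countP
            (fun e' => goodB nums k i e' && decide (e ≤ e')) : Nat) : Int) := by
  intro e hie hen cnt ans hcnt
  induction hd : nums.length - e generalizing e cnt ans with
  | zero =>
    have he : e = nums.length := by omega
    subst he
    rw [PySem.List.pyRange_one_eq_nil (le_refl _), List.foldl_nil]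
    have h0 : (List.range nums.length).countP
        (fun e' => goodB nums k i e' && decide (nums.length ≤ e')) = 0 := by
      rw [List.countP_eq_zero]
      intro e' he'
      simp only [List.mem_range] at he'
      simp [Nat.not_le.mpr he']
    simp [h0]
  | succ d ihd =>
    have helt : e < nums.length := by omega
    have hcons : PySem.List.pyRange (e : Int) (nums.length : Int) 1
        = (e : Int) :: PySem.List.pyRange ((e : Int) + 1) (nums.length : Int) 1 :=
      PySem.List.pyRange_one_cons (by exact_mod_cast helt)
    rw [hcons, List.foldl_cons]
    simp only
    have hx : PySem.List.pyGetD nums (e : Int) 0 = nums[e]'helt := by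
      simp [PySem.List.pyGetD_natCast, List.getD_eq_getElem?_getD,
        List.getElem?_eq_getElem helt]
    have hwin : win nums i (e + 1) = win nums i e ++ [nums[e]'helt] :=
      win_succ_right nums i e hie helt
    have hpairs : pairsOf (win nums i e) + cnt.getD (PySem.List.pyGetD nums (e : Int) 0) 0
        = pairsOf (win nums i (e + 1)) := by
      rw [hx, hcnt, hwin, pairsOf_append_singleton]
    have hcnt' : hmOK nums
        (cnt.insert (PySem.List.pyGetD nums (e : Int) 0)
          (cnt.getD (PySem.List.pyGetD nums (e : Int) 0) 0 + 1)) i (e + 1) := by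
      rw [hx]
      intro v
      rcases eq_or_ne v (nums[e]'helt) with hv | hv
      · subst hv
        rw [PySem.Dict.getD_insert_self, hcnt _, hwin]
        simp [List.count_append]
      · rw [PySem.Dict.getD_insert]
        simp only [hv, if_false]
        rw [hcnt v, hwin]
        simp [List.count_append, Ne.symm hv]
    have hcast : ((e : Int) + 1) = ((e + 1 : Nat) : Int) := by push_cast; ring
    rw [hpairs, hcast]
    rw [ihd (e + 1) (by omega) (by omega) _ _ hcnt' (by omega)]
    -- it remains to split the count at e
    have hif : (if (i : Int) < (e : Int) ∧ k ≤ pairsOf (win nums i (e + 1))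
          then ans + 1 else ans)
        = ans + (if goodB nums k i e then (1 : Int) else 0) := by
      simp only [goodB, Bool.and_eq_true, decide_eq_true_eq]
      split_ifs with h1 h2 h2
      · ring
      · exact absurd ⟨by exact_mod_cast h1.1, h1.2⟩ h2
      · exact absurd ⟨by exact_mod_cast h2.1, h2.2⟩ h1
      · ring
    rw [hif]
    have hsplit : (List.range nums.length).countP
          (fun e' => goodB nums k i e' && decide (e ≤ e'))
        = (if goodB nums k i e then 1 else 0) + (List.range nums.length).countP
          (fun e' => goodB nums k i e' && decide (e + 1 ≤ e')) := by
      have : nums.length = (nums.length - (e + 1)) + (e + 1) := by omega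
      rw [this]
      clear hcons hpairs hcnt' ihd hwin this
      induction (nums.length - (e + 1)) with
      | zero =>
        simp only [Nat.zero_add, List.range_succ, List.countP_append, List.countP_cons]
        have h0 : ∀ (p : Nat → Bool) (c : Nat), e ≤ c →
            (List.range e).countP (fun e' => p e' && decide (c ≤ e')) = 0 := by
          intro p c hc
          rw [List.countP_eq_zero]
          intro e' he'
          simp only [List.mem_range] at he'
          simp only [Bool.and_eq_true, decide_eq_true_eq, not_and]
          intro _
          omega
        rw [h0 _ e (le_refl _), h0 _ (e + 1) (by omega)]
        simp
      | succ d ihd2 =>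
        have hstep : d + 1 + (e + 1) = (d + (e + 1)) + 1 := by omega
        rw [hstep, List.range_succ, List.countP_append, List.countP_append, ihd2]
        have : decide (e ≤ d + (e + 1)) = true := by simp only [decide_eq_true_eq]; omega
        have h2 : decide (e + 1 ≤ d + (e + 1)) = true := by simp only [decide_eq_true_eq]; omega
        simp only [List.countP_cons, List.countP_nil, this, h2, Bool.and_true]
        omega
    rw [hsplit]
    push_cast
    split_ifs <;> ring

theorem countGood_alt_eq_S (nums : List Int) (k : Int) :
    countGood_alt nums k = S nums k nums.length := by
  have main : ∀ m : Nat, m ≤ nums.length →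
      (PySem.List.pyRange 0 (m : Int) 1).foldl
        (fun ans i =>
          ((PySem.List.pyRange i (nums.length : Int) 1).foldl
            (fun (st : PySem.Dict Int Int × Int × Int) e =>
              let (cnt, pairs, ans) := st
              let x := PySem.List.pyGetD nums e 0
              let pairs := pairs + cnt.getD x 0
              let cnt := cnt.insert x (cnt.getD x 0 + 1)
              let ans := if i < e ∧ k ≤ pairs then ans + 1 else ans
              (cnt, pairs, ans))
            (PySem.Dict.empty, 0, ans)).2.2)
        0 = S nums k m := by
    intro m
    induction m with
    | zero =>
      intro _
      simp [PySem.List.pyRange_one_eq_nil, S]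
    | succ m ih =>
      intro hm1
      have hmlt : m < nums.length := by omega
      have hrange : PySem.List.pyRange 0 ((m + 1 : Nat) : Int) 1
          = PySem.List.pyRange 0 (m : Int) 1 ++ [(m : Int)] := by
        push_cast
        exact PySem.List.pyRange_one_succ_right (by positivity)
      rw [hrange, List.foldl_append, ih (by omega)]
      simp only [List.foldl_cons, List.foldl_nil]
      have hw0 : pairsOf (win nums m m) = 0 := by simp [win, pairsOf]
      have hinner := inner_spec nums k m hmlt m (le_refl _) (by omega)
        PySem.Dict.empty (S nums k m)
        (by intro v; simp [PySem.Dict.getD_empty, win])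
      rw [hw0] at hinner
      rw [hinner, S_succ]
      congr 1
      have hcongr : ∀ e' ∈ List.range nums.length,
          ((goodB nums k m e' && decide (m ≤ e')) = true ↔ goodB nums k m e' = true) := by
        intro e' _
        simp only [Bool.and_eq_true, decide_eq_true_eq, and_iff_left_iff_imp]
        intro hg
        have hlt : m < e' := by
          simp only [goodB, Bool.and_eq_true, decide_eq_true_eq] at hg
          exact hg.1
        omega
      rw [List.countP_congr hcongr]
      rfl
  exact main nums.length (le_refl _)

-- ===== VERDICT (by name: the statement is the Claim_ definition above) =====
theorem countGood_spec : Claim_equal_countGood := by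
  intro nums k _
  unfold Spec_countGood
  rw [countGood_eq_S, countGood_alt_eq_S]
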